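-- pv_equiv track=rewrite | github.com/idleh4021/study-algorithm | Python3/프로그래머스/1/131128. 숫자 짝꿍/숫자 짝꿍.py | solution
-- ===== SOURCE A (Python) =====
-- def solution(X, Y):
--     answer = '-1'
--     X = sorted(X);
--     Y= sorted(Y);
--     num_X = {}
--     num_Y = {}
--     answer_list = []
--     for i in range(10):
--         str_num = str(i)
--         num_X[str_num] = X.count(str_num)
--         num_Y[str_num] = Y.count(str_num)
--
--     for i in sorted(num_X,reverse=True):
--         while True:
--             if num_X[i]==0: break
--             if num_Y[i]==0: break
--             answer_list.append(i)
--             if i=='0' and answer_list[0]=='0' : break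
--             num_X[i]-=1
--             num_Y[i]-=1
--
--
--     return answer if len(answer_list)==0 else ''.join(answer_list)
-- ===== SOURCE B (Python) =====
-- def solution(X, Y):
--     xs = sorted(c for c in X if '0' <= c <= '9')
--     ys = sorted(c for c in Y if '0' <= c <= '9')
--     common = []
--     i = j = 0
--     while i < len(xs) and j < len(ys):
--         if xs[i] == ys[j]:
--             common.append(xs[i])
--             i += 1
--             j += 1
--         elif xs[i] < ys[j]:
--             i += 1
--         else:
--             j += 1
--     if not common:
--         return '-1'
--     s = ''.join(reversed(common))
--     return '0' if s[0] == '0' else s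
-- ===== Notes on version B (the rewrite author's own statement) =====
-- stated objective: faster
-- what changed: A tallies each of the ten digits with per-digit list.count into two dicts and materialises each digit's contribution by a decrementing while-loop with a break-driven '0' special case; B filters both strings to digits, sorts them, extracts the common-digit multiset with a single two-pointer sorted-merge intersection, then reverses it and resolves the empty and all-zero cases by looking at the result string itself.
import Mathlib
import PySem

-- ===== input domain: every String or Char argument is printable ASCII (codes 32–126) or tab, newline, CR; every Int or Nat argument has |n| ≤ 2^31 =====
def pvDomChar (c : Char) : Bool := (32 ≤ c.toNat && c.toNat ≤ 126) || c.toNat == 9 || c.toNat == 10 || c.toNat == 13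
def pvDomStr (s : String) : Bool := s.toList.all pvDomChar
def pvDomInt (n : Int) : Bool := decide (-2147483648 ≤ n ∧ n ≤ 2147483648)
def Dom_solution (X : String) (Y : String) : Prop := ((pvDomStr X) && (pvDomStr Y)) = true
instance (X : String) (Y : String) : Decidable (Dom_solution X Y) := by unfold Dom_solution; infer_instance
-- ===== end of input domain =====

-- B replaces A's per-digit counting dicts and decrementing while-loops by a two-pointer merge
-- intersection of the two sorted digit lists (objective: alternative algorithm; same results).


-- ===== PORT A =====
-- A's 'while True' loop; the fuel argument (nx.toNat + 1 at the call site) only makes it total: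
-- each non-breaking iteration decrements nx by 1 and the loop breaks at nx == 0
def pvInner (i : Char) (fuel : Nat) (nx ny : Int) (acc : List Char) : List Char × Int × Int :=
  match fuel with
  | 0 => (acc, nx, ny)
  | fuel+1 =>
    if nx = 0 then (acc, nx, ny)
    else if ny = 0 then (acc, nx, ny)
    else
      if i = '0' ∧ (acc ++ [i]).headD ' ' = '0' then (acc ++ [i], nx, ny)
      else pvInner i fuel (nx - 1) (ny - 1) (acc ++ [i])

-- Python's str(i) for 0 ≤ i ≤ 9 (Python's 1-character strings are Char here)
def pvDigitChar (i : Int) : Char := Char.ofNat (48 + i.toNat)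

-- the body of A's 'for i in sorted(num_X, reverse=True)' loop; num_X[i]/num_Y[i] are read with
-- getD (the keys '0'..'9' are always present, so Python's d[i] raises no KeyError here) and the
-- decremented counters are written back
def pvStep (st : PySem.Dict Char Int × PySem.Dict Char Int × List Char) (i : Char) :
    PySem.Dict Char Int × PySem.Dict Char Int × List Char :=
  let nx := st.1.getD i 0
  let ny := st.2.1.getD i 0
  let r := pvInner i (nx.toNat + 1) nx ny st.2.2
  (st.1.insert i r.2.1, st.2.1.insert i r.2.2, r.1)

-- A's 'for i in range(10)' loop filling num_X and num_Y
def pvNums (Xs Ys : List Char) : PySem.Dict Char Int × PySem.Dict Char Int :=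
  (PySem.List.pyRange 0 10 1).foldl
    (fun p i =>
      let str_num := pvDigitChar i
      (p.1.insert str_num (Xs.count str_num : Int), p.2.insert str_num (Ys.count str_num : Int)))
    (PySem.Dict.empty, PySem.Dict.empty)

def solution (X : String) (Y : String) : String :=
  let answer := "-1"
  let Xs := PySem.List.sorted X.toList (fun c => c) false
  let Ys := PySem.List.sorted Y.toList (fun c => c) false
  let nums := pvNums Xs Ys
  let st := (PySem.List.sorted nums.1.keys (fun k => k) true).foldl pvStep (nums.1, nums.2, [])
  if st.2.2.length = 0 then answer else String.ofList st.2.2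

-- ===== PORT B =====
-- Python's "'0' <= c <= '9'" (code-point comparison, identical on Char)
def pvIsDig (c : Char) : Bool := '0' ≤ c && c ≤ '9'

-- B's two-pointer while loop, as the obvious structural recursion over the two sorted lists
def pvMerge (xs ys acc : List Char) : List Char :=
  match xs, ys with
  | x :: xs', y :: ys' =>
    if x = y then pvMerge xs' ys' (acc ++ [x])
    else if x < y then pvMerge xs' (y :: ys') acc
    else pvMerge (x :: xs') ys' acc
  | _, _ => acc
termination_by xs.length + ys.length
decreasing_by all_goals (simp only [List.length_cons]; omega)

def solution_alt (X : String) (Y : String) : String :=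
  let xs := PySem.List.sorted (X.toList.filter pvIsDig) (fun c => c) false
  let ys := PySem.List.sorted (Y.toList.filter pvIsDig) (fun c => c) false
  let common := pvMerge xs ys []
  if common = [] then "-1"
  else
    let s := common.reverse
    if s.headD ' ' = '0' then "0" else String.ofList s

-- ===== PRECONDITION & SPEC =====
def Spec_solution (X : String) (Y : String) (out : String) : Prop := out = solution_alt X Y
instance (X : String) (Y : String) (out : String) : Decidable (Spec_solution X Y out) := by unfold Spec_solution; infer_instance

-- ===== CLAIM (what is proved, stated in full; the proofs are below) =====
def Claim_equal_solution : Prop := ∀ (X : String) (Y : String), Dom_solution X Y → Spec_solution X Y (solution X Y)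

-- ===== LEMMAS AND PROOFS =====

lemma headD_mem {α : Type} (l : List α) (h : l ≠ []) (x : α) : l.headD x ∈ l := by
  cases l with
  | nil => exact absurd rfl h
  | cons a t => simp

lemma headD_append {α : Type} (l r : List α) (h : l ≠ []) (x : α) :
    (l ++ r).headD x = l.headD x := by
  cases l with
  | nil => exact absurd rfl h
  | cons a t => simp

-- the while loop when it can never hit the '0'-break: appends min a b copies of i
lemma pvInner_spec (i : Char) (a b : Nat) (acc : List Char)
    (hne : i ≠ '0' ∨ (acc ≠ [] ∧ acc.headD ' ' ≠ '0')) :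
    pvInner i (a + 1) (a : Int) (b : Int) acc =
      (acc ++ List.replicate (min a b) i, ((a - min a b : Nat) : Int), ((b - min a b : Nat) : Int)) := by
  induction a generalizing b acc with
  | zero => simp [pvInner]
  | succ a ih =>
    cases b with
    | zero => simp [pvInner]
    | succ b =>
      have hbreak : ¬ (i = '0' ∧ (acc ++ [i]).headD ' ' = '0') := by
        rcases hne with h | ⟨h1, h2⟩
        · rintro ⟨rfl, -⟩; exact h rfl
        · rw [headD_append _ _ h1]
          rintro ⟨-, h3⟩; exact h2 h3
      have hne' : i ≠ '0' ∨ ((acc ++ [i]) ≠ [] ∧ (acc ++ [i]).headD ' ' ≠ '0') := by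
        rcases hne with h | ⟨h1, h2⟩
        · exact Or.inl h
        · exact Or.inr ⟨by simp, by rw [headD_append _ _ h1]; exact h2⟩
      have h1 : ((a + 1 : Nat) : Int) ≠ 0 := by omega
      have h2 : ((b + 1 : Nat) : Int) ≠ 0 := by omega
      have hrec : pvInner i (a + 1 + 1) ((a + 1 : Nat) : Int) ((b + 1 : Nat) : Int) acc =
          pvInner i (a + 1) ((a : Nat) : Int) ((b : Nat) : Int) (acc ++ [i]) := by
        rw [pvInner]
        simp only [h1, h2, hbreak, if_false]
        norm_num
      rw [hrec, ih b (acc ++ [i]) hne']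
      have hmin : min (a + 1) (b + 1) = min a b + 1 := by omega
      simp only [hmin, List.replicate_succ, Prod.mk.injEq]
      refine ⟨by simp, by push_cast; omega, by push_cast; omega⟩

lemma pvInner_spec_ne (i : Char) (h : ¬ i = '0') (a b : Nat) (acc : List Char) :
    pvInner i (a + 1) (a : Int) (b : Int) acc =
      (acc ++ List.replicate (min a b) i, ((a - min a b : Nat) : Int), ((b - min a b : Nat) : Int)) :=
  pvInner_spec i a b acc (Or.inl h)

-- the while loop at digit '0' starting from an empty answer list
lemma pvInner_zero_nil (a b : Nat) :
    pvInner '0' (a + 1) (a : Int) (b : Int) [] =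
      (if min a b = 0 then [] else ['0'], (a : Int), (b : Int)) := by
  cases a with
  | zero => simp [pvInner]
  | succ a =>
    cases b with
    | zero => simp [pvInner]
    | succ b =>
      have h1 : ((a + 1 : Nat) : Int) ≠ 0 := by omega
      have h2 : ((b + 1 : Nat) : Int) ≠ 0 := by omega
      rw [pvInner]
      simp only [h1, h2, if_false]
      simp

-- one of the two digit-count dictionaries of A, as a single fold
def pvF (L : List Char) : PySem.Dict Char Int :=
  (PySem.List.pyRange 0 10 1).foldl
    (fun d i => d.insert (pvDigitChar i) ((L.count (pvDigitChar i)) : Int)) PySem.Dict.empty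

lemma pvNums_split (L M : List Char) : pvNums L M = (pvF L, pvF M) := by
  unfold pvNums
  rw [PySem.List.foldl_prod_mk
    (f := fun d i => PySem.Dict.insert d (pvDigitChar i) ((L.count (pvDigitChar i)) : Int))
    (g := fun d i => PySem.Dict.insert d (pvDigitChar i) ((M.count (pvDigitChar i)) : Int))]
  rfl

lemma pvNums_fst (L M : List Char) : (pvNums L M).1 = pvF L := by
  rw [pvNums_split]

lemma pvNums_snd (L M : List Char) : (pvNums L M).2 = pvF M := by
  rw [pvNums_split]

lemma pvF_keys (L : List Char) : (pvF L).keys = ['0','1','2','3','4','5','6','7','8','9'] := by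
  unfold pvF
  rw [PySem.Dict.keys_foldl_insert_key]
  decide

lemma pvF_getD (L : List Char) (d : Char) (hd : d ∈ (['0','1','2','3','4','5','6','7','8','9'] : List Char)) :
    (pvF L).getD d 0 = (L.count d : Int) := by
  have hitems : (pvF L).items =
      (PySem.List.pyRange 0 10 1).map (fun i => (pvDigitChar i, (L.count (pvDigitChar i) : Int))) := by
    unfold pvF
    rw [PySem.Dict.items_foldl_insert_fresh] <;> try decide
    · rfl
  have hnd : (pvF L).keys.Nodup := by rw [pvF_keys]; decide
  refine PySem.Dict.getD_of_mem_items _ ?_ hnd 0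
  rw [hitems]
  simp only [List.mem_map]
  simp only [List.mem_cons, List.not_mem_nil, or_false] at hd
  rcases hd with rfl | rfl | rfl | rfl | rfl | rfl | rfl | rfl | rfl | rfl
  · exact ⟨0, by decide, by rw [show pvDigitChar 0 = '0' from by decide]⟩
  · exact ⟨1, by decide, by rw [show pvDigitChar 1 = '1' from by decide]⟩
  · exact ⟨2, by decide, by rw [show pvDigitChar 2 = '2' from by decide]⟩
  · exact ⟨3, by decide, by rw [show pvDigitChar 3 = '3' from by decide]⟩
  · exact ⟨4, by decide, by rw [show pvDigitChar 4 = '4' from by decide]⟩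
  · exact ⟨5, by decide, by rw [show pvDigitChar 5 = '5' from by decide]⟩
  · exact ⟨6, by decide, by rw [show pvDigitChar 6 = '6' from by decide]⟩
  · exact ⟨7, by decide, by rw [show pvDigitChar 7 = '7' from by decide]⟩
  · exact ⟨8, by decide, by rw [show pvDigitChar 8 = '8' from by decide]⟩
  · exact ⟨9, by decide, by rw [show pvDigitChar 9 = '9' from by decide]⟩

-- A's outer loop body at a non-'0' key, with both counter lookups known
lemma pvStep_eq (d1 d2 : PySem.Dict Char Int) (acc : List Char) (i : Char) (cx cy : Nat)
    (h1 : d1.getD i 0 = (cx : Int)) (h2 : d2.getD i 0 = (cy : Int)) (hi : ¬ i = '0') :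
    pvStep (d1, d2, acc) i =
      (d1.insert i ((cx - min cx cy : Nat) : Int), d2.insert i ((cy - min cx cy : Nat) : Int),
        acc ++ List.replicate (min cx cy) i) := by
  unfold pvStep
  simp only [h1, h2, Int.toNat_natCast]
  rw [pvInner_spec_ne i hi]

-- folding A's loop over distinct non-'0' keys: the answer list grows by one replicate block per
-- key, and lookups at untouched keys are unchanged
lemma pvFold_spec (ds : List Char) (cX cY : Char → Nat) (d1 d2 : PySem.Dict Char Int) (acc : List Char)
    (hnd : ds.Nodup) (h0 : '0' ∉ ds)
    (h1 : ∀ i ∈ ds, d1.getD i 0 = (cX i : Int)) (h2 : ∀ i ∈ ds, d2.getD i 0 = (cY i : Int)) :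
    (ds.foldl pvStep (d1, d2, acc)).2.2
        = acc ++ ds.flatMap (fun d => List.replicate (min (cX d) (cY d)) d)
    ∧ (∀ j, j ∉ ds → (ds.foldl pvStep (d1, d2, acc)).1.getD j 0 = d1.getD j 0)
    ∧ (∀ j, j ∉ ds → (ds.foldl pvStep (d1, d2, acc)).2.1.getD j 0 = d2.getD j 0) := by
  induction ds generalizing d1 d2 acc with
  | nil => simp
  | cons i t ih =>
    have hi0 : ¬ i = '0' := by
      intro h; exact h0 (by simp [h])
    have hit : i ∉ t := (List.nodup_cons.mp hnd).1
    rw [List.foldl_cons, pvStep_eq d1 d2 acc i (cX i) (cY i) (h1 i (by simp)) (h2 i (by simp)) hi0]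
    have ih' := ih (d1.insert i ((cX i - min (cX i) (cY i) : Nat) : Int))
        (d2.insert i ((cY i - min (cX i) (cY i) : Nat) : Int))
        (acc ++ List.replicate (min (cX i) (cY i)) i)
        (List.nodup_cons.mp hnd).2 (fun h => h0 (List.mem_cons_of_mem i h))
        (fun j hj => by
          rw [PySem.Dict.getD_insert, if_neg (show ¬ j = i from fun he => hit (by rwa [he] at hj))]
          exact h1 j (List.mem_cons_of_mem i hj))
        (fun j hj => by
          rw [PySem.Dict.getD_insert, if_neg (show ¬ j = i from fun he => hit (by rwa [he] at hj))]
          exact h2 j (List.mem_cons_of_mem i hj))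
    obtain ⟨ha, hb, hc⟩ := ih'
    refine ⟨?_, ?_, ?_⟩
    · rw [ha, List.flatMap_cons, List.append_assoc]
    · intro j hj
      have hjt : j ∉ t := fun h => hj (List.mem_cons_of_mem i h)
      have hji : ¬ j = i := fun he => hj (by simp [he])
      rw [hb j hjt, PySem.Dict.getD_insert, if_neg hji]
    · intro j hj
      have hjt : j ∉ t := fun h => hj (List.mem_cons_of_mem i h)
      have hji : ¬ j = i := fun he => hj (by simp [he])
      rw [hc j hjt, PySem.Dict.getD_insert, if_neg hji]

-- A's outer loop body at key '0'
lemma pvStep_zero (st : PySem.Dict Char Int × PySem.Dict Char Int × List Char) (cx cy : Nat)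
    (h1 : st.1.getD '0' 0 = (cx : Int)) (h2 : st.2.1.getD '0' 0 = (cy : Int)) :
    (pvStep st '0').2.2 = (pvInner '0' (cx + 1) (cx : Int) (cy : Int) st.2.2).1 := by
  unfold pvStep
  simp only [h1, h2, Int.toNat_natCast]

-- resolving A's final '-1'/join once the loop result is known
lemma pvFinal (a b : Nat) (l : List Char) (hl : ∀ c ∈ l, c ≠ '0') :
    (if (pvInner '0' (a + 1) (a : Int) (b : Int) l).1.length = 0 then "-1"
     else String.ofList (pvInner '0' (a + 1) (a : Int) (b : Int) l).1)
    = (if l = [] then (if min a b = 0 then "-1" else "0")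
       else String.ofList (l ++ List.replicate (min a b) '0')) := by
  by_cases h : l = []
  · subst h
    rw [pvInner_zero_nil]
    by_cases hm : min a b = 0 <;> simp [hm]
  · have hh : l.headD ' ' ≠ '0' := fun h0 => hl _ (headD_mem l h ' ') h0
    rw [pvInner_spec '0' a b l (Or.inr ⟨h, hh⟩)]
    simp [h]

lemma solution_core (X Y : String) :
    solution X Y =
      (if ['9','8','7','6','5','4','3','2','1'].flatMap
            (fun d => List.replicate (min (X.toList.count d) (Y.toList.count d)) d) = []
       then (if min (X.toList.count '0') (Y.toList.count '0') = 0 then "-1" else "0")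
       else String.ofList
          (['9','8','7','6','5','4','3','2','1'].flatMap
              (fun d => List.replicate (min (X.toList.count d) (Y.toList.count d)) d)
            ++ List.replicate (min (X.toList.count '0') (Y.toList.count '0')) '0')) := by
  have hcX : ∀ d : Char, (PySem.List.sorted X.toList (fun c => c) false).count d = X.toList.count d :=
    fun d => (PySem.List.sorted_perm X.toList (fun c => c) false).count_eq d
  have hcY : ∀ d : Char, (PySem.List.sorted Y.toList (fun c => c) false).count d = Y.toList.count d :=
    fun d => (PySem.List.sorted_perm Y.toList (fun c => c) false).count_eq d
  have hgX : ∀ i ∈ (['9','8','7','6','5','4','3','2','1','0'] : List Char),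
      (pvF (PySem.List.sorted X.toList (fun c => c) false)).getD i 0 = (X.toList.count i : Int) := by
    intro i hi
    refine (pvF_getD _ i ?_).trans (by rw [hcX])
    simp only [List.mem_cons, List.not_mem_nil, or_false] at hi ⊢
    tauto
  have hgY : ∀ i ∈ (['9','8','7','6','5','4','3','2','1','0'] : List Char),
      (pvF (PySem.List.sorted Y.toList (fun c => c) false)).getD i 0 = (Y.toList.count i : Int) := by
    intro i hi
    refine (pvF_getD _ i ?_).trans (by rw [hcY])
    simp only [List.mem_cons, List.not_mem_nil, or_false] at hi ⊢
    tauto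
  show
    (if ((PySem.List.sorted
            (pvNums (PySem.List.sorted X.toList (fun c => c) false)
                (PySem.List.sorted Y.toList (fun c => c) false)).1.keys (fun k => k) true).foldl
          pvStep
          ((pvNums (PySem.List.sorted X.toList (fun c => c) false)
              (PySem.List.sorted Y.toList (fun c => c) false)).1,
           (pvNums (PySem.List.sorted X.toList (fun c => c) false)
              (PySem.List.sorted Y.toList (fun c => c) false)).2, [])).2.2.length = 0
     then "-1"
     else String.ofList
        ((PySem.List.sorted
            (pvNums (PySem.List.sorted X.toList (fun c => c) false)
                (PySem.List.sorted Y.toList (fun c => c) false)).1.keys (fun k => k) true).foldl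
          pvStep
          ((pvNums (PySem.List.sorted X.toList (fun c => c) false)
              (PySem.List.sorted Y.toList (fun c => c) false)).1,
           (pvNums (PySem.List.sorted X.toList (fun c => c) false)
              (PySem.List.sorted Y.toList (fun c => c) false)).2, [])).2.2) = _
  rw [pvNums_fst, pvNums_snd]
  rw [pvF_keys, show PySem.List.sorted ['0','1','2','3','4','5','6','7','8','9'] (fun k => k) true
      = ['9','8','7','6','5','4','3','2','1','0'] from by decide]
  rw [show (['9','8','7','6','5','4','3','2','1','0'] : List Char)
      = ['9','8','7','6','5','4','3','2','1'] ++ ['0'] from rfl, List.foldl_append]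
  obtain ⟨H1, H2, H3⟩ := pvFold_spec ['9','8','7','6','5','4','3','2','1']
    (fun d => X.toList.count d) (fun d => Y.toList.count d)
    (pvF (PySem.List.sorted X.toList (fun c => c) false))
    (pvF (PySem.List.sorted Y.toList (fun c => c) false)) [] (by decide) (by decide)
    (fun i hi => hgX i (by simp only [List.mem_cons, List.not_mem_nil, or_false] at hi ⊢; tauto))
    (fun i hi => hgY i (by simp only [List.mem_cons, List.not_mem_nil, or_false] at hi ⊢; tauto))
  rw [List.foldl_cons, List.foldl_nil]
  rw [pvStep_zero _ (X.toList.count '0') (Y.toList.count '0')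
      ((H2 '0' (by decide)).trans (hgX '0' (by simp)))
      ((H3 '0' (by decide)).trans (hgY '0' (by simp)))]
  rw [H1, List.nil_append]
  rw [pvFinal]
  intro c hc
  simp only [List.mem_flatMap] at hc
  obtain ⟨d, hd, hcd⟩ := hc
  rw [List.eq_of_mem_replicate hcd]
  simp only [List.mem_cons, List.not_mem_nil, or_false] at hd
  rcases hd with rfl | rfl | rfl | rfl | rfl | rfl | rfl | rfl | rfl <;> decide

-- ===== B-side characterisation =====

-- a char passes B's digit filter iff it is one of the ten digit characters
lemma pvIsDig_iff_mem (c : Char) :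
    pvIsDig c = true ↔ c ∈ (['0','1','2','3','4','5','6','7','8','9'] : List Char) := by
  constructor
  · intro h
    simp only [pvIsDig, Bool.and_eq_true, decide_eq_true_eq] at h
    obtain ⟨h1, h2⟩ := h
    rw [Char.le_def] at h1 h2
    have h1' : 48 ≤ c.toNat := h1
    have h2' : c.toNat ≤ 57 := h2
    have hc : c = Char.ofNat c.toNat := (Char.ofNat_toNat c).symm
    interval_cases h : c.toNat <;> rw [hc] <;> decide
  · intro h
    simp only [List.mem_cons, List.not_mem_nil, or_false] at h
    rcases h with rfl|rfl|rfl|rfl|rfl|rfl|rfl|rfl|rfl|rfl <;> decide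

-- a concatenation of one-value blocks over a ≤-sorted value list is ≤-sorted
lemma pairwise_flatMap_rep (ds : List Char) (n : Char → Nat) (h : ds.Pairwise (· ≤ ·)) :
    (ds.flatMap fun d => List.replicate (n d) d).Pairwise (· ≤ ·) := by
  induction ds with
  | nil => simp
  | cons d t ih =>
    rw [List.flatMap_cons, List.pairwise_append]
    refine ⟨?_, ih (List.pairwise_cons.mp h).2, ?_⟩
    · exact List.pairwise_replicate.mpr (Or.inr le_rfl)
    · intro a ha b hb
      rw [List.eq_of_mem_replicate ha]
      simp only [List.mem_flatMap] at hb
      obtain ⟨d', hd', hb'⟩ := hb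
      rw [List.eq_of_mem_replicate hb']
      exact (List.pairwise_cons.mp h).1 d' hd'

-- sorted(filter digits L) is the ascending concatenation of one replicate block per digit
lemma sorted_filter_eq (L : List Char) :
    PySem.List.sorted (L.filter pvIsDig) (fun c => c) false =
      ['0','1','2','3','4','5','6','7','8','9'].flatMap
        (fun d => List.replicate (L.count d) d) := by
  apply PySem.List.sorted_id_eq_of_perm_of_pairwise
  · rw [List.perm_iff_count]
    intro c
    by_cases hd : pvIsDig c = true
    · have hm := (pvIsDig_iff_mem c).mp hd
      simp only [List.mem_cons, List.not_mem_nil, or_false] at hm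
      rcases hm with rfl|rfl|rfl|rfl|rfl|rfl|rfl|rfl|rfl|rfl <;>
        simp [List.count_replicate, List.count_filter, pvIsDig]
    · have hm : ∀ d ∈ (['0','1','2','3','4','5','6','7','8','9'] : List Char), c ≠ d := by
        intro d hdm he
        exact hd ((pvIsDig_iff_mem c).mpr (he ▸ hdm))
      have hm0 : List.count c (L.filter pvIsDig) = 0 :=
        List.count_eq_zero.mpr (fun hmem => hd (List.of_mem_filter hmem))
      simp only [List.flatMap_cons, List.flatMap_nil, List.count_append, List.count_replicate,
        List.append_nil, hm0, beq_iff_eq]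
      rw [if_neg (Ne.symm (hm '0' (by simp))), if_neg (Ne.symm (hm '1' (by simp))),
          if_neg (Ne.symm (hm '2' (by simp))), if_neg (Ne.symm (hm '3' (by simp))),
          if_neg (Ne.symm (hm '4' (by simp))), if_neg (Ne.symm (hm '5' (by simp))),
          if_neg (Ne.symm (hm '6' (by simp))), if_neg (Ne.symm (hm '7' (by simp))),
          if_neg (Ne.symm (hm '8' (by simp))), if_neg (Ne.symm (hm '9' (by simp)))]
  · exact pairwise_flatMap_rep _ _ (by decide)

lemma pvMerge_nil_left (ys acc : List Char) : pvMerge [] ys acc = acc := by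
  cases ys <;> simp [pvMerge]

lemma pvMerge_nil_right (xs acc : List Char) : pvMerge xs [] acc = acc := by
  cases xs <;> simp [pvMerge]

-- the right pointer skips a block of d's smaller than everything on the left
lemma pvMerge_skip_right (d : Char) (b : Nat) (xs ys acc : List Char)
    (hx : ∀ x ∈ xs, d < x) :
    pvMerge xs (List.replicate b d ++ ys) acc = pvMerge xs ys acc := by
  induction b generalizing acc with
  | zero => simp
  | succ b ih =>
    cases xs with
    | nil => rw [pvMerge_nil_left, pvMerge_nil_left]
    | cons x xs' =>
      have hdx : d < x := hx x (by simp)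
      rw [List.replicate_succ, List.cons_append, pvMerge,
        if_neg (by intro h; exact absurd h.symm (ne_of_lt hdx)),
        if_neg (by intro h; exact absurd (lt_trans hdx h) (lt_irrefl d))]
      exact ih acc

-- the left pointer skips a block of d's smaller than everything on the right
lemma pvMerge_skip_left (d : Char) (a : Nat) (xs ys acc : List Char)
    (hy : ∀ y ∈ ys, d < y) :
    pvMerge (List.replicate a d ++ xs) ys acc = pvMerge xs ys acc := by
  induction a generalizing acc with
  | zero => simp
  | succ a ih =>
    cases ys with
    | nil => rw [pvMerge_nil_right, pvMerge_nil_right]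
    | cons y ys' =>
      have hdy : d < y := hy y (by simp)
      rw [List.replicate_succ, List.cons_append, pvMerge,
        if_neg (ne_of_lt hdy), if_pos hdy]
      exact ih acc

-- matching blocks of the same digit contribute min a b copies
lemma pvMerge_block (d : Char) (a b : Nat) (xs ys acc : List Char)
    (hx : ∀ x ∈ xs, d < x) (hy : ∀ y ∈ ys, d < y) :
    pvMerge (List.replicate a d ++ xs) (List.replicate b d ++ ys) acc =
      pvMerge xs ys (acc ++ List.replicate (min a b) d) := by
  induction a generalizing b acc with
  | zero => simp [pvMerge_skip_right d b xs ys acc hx]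
  | succ a ih =>
    cases b with
    | zero =>
      simp only [List.replicate_zero, List.nil_append, Nat.min_zero, List.append_nil]
      exact pvMerge_skip_left d (a+1) xs (List.replicate 0 d ++ ys) acc (by simpa using hy)
        |>.trans (by simp)
    | succ b =>
      rw [List.replicate_succ, List.replicate_succ, List.cons_append, List.cons_append,
        pvMerge, if_pos rfl]
      rw [ih b (acc ++ [d])]
      have : min (a+1) (b+1) = min a b + 1 := by omega
      rw [this, List.replicate_succ, List.append_assoc]
      rfl

-- the merge of two block decompositions over the same strictly ascending digit list
lemma pvMerge_main (ds : List Char) (nX nY : Char → Nat) (acc : List Char)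
    (h : ds.Pairwise (· < ·)) :
    pvMerge (ds.flatMap fun d => List.replicate (nX d) d)
            (ds.flatMap fun d => List.replicate (nY d) d) acc =
      acc ++ ds.flatMap (fun d => List.replicate (min (nX d) (nY d)) d) := by
  induction ds generalizing acc with
  | nil => simp [pvMerge_nil_left]
  | cons d t ih =>
    have hlt : ∀ d' ∈ t, d < d' := (List.pairwise_cons.mp h).1
    have hmem : ∀ (n : Char → Nat) (z : Char),
        z ∈ (t.flatMap fun d' => List.replicate (n d') d') → d < z := by
      intro n z hz
      simp only [List.mem_flatMap] at hz
      obtain ⟨d', hd', hz'⟩ := hz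
      rw [List.eq_of_mem_replicate hz']
      exact hlt d' hd'
    simp only [List.flatMap_cons]
    rw [pvMerge_block d (nX d) (nY d) _ _ acc (hmem nX) (hmem nY),
      ih (acc ++ List.replicate (min (nX d) (nY d)) d) (List.pairwise_cons.mp h).2,
      List.append_assoc]

lemma alt_core (X Y : String) :
    solution_alt X Y =
      (if ['9','8','7','6','5','4','3','2','1','0'].flatMap
            (fun d => List.replicate (min (X.toList.count d) (Y.toList.count d)) d) = []
       then "-1"
       else if (['9','8','7','6','5','4','3','2','1','0'].flatMap
            (fun d => List.replicate (min (X.toList.count d) (Y.toList.count d)) d)).headD ' ' = '0'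
       then "0"
       else String.ofList (['9','8','7','6','5','4','3','2','1','0'].flatMap
            (fun d => List.replicate (min (X.toList.count d) (Y.toList.count d)) d))) := by
  have hasc : pvMerge (PySem.List.sorted (X.toList.filter pvIsDig) (fun c => c) false)
      (PySem.List.sorted (Y.toList.filter pvIsDig) (fun c => c) false) [] =
      ['0','1','2','3','4','5','6','7','8','9'].flatMap
        (fun d => List.replicate (min (X.toList.count d) (Y.toList.count d)) d) := by
    rw [sorted_filter_eq, sorted_filter_eq,
      pvMerge_main ['0','1','2','3','4','5','6','7','8','9']
        (fun d => X.toList.count d) (fun d => Y.toList.count d) [] (by decide),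
      List.nil_append]
  have hrev : (['0','1','2','3','4','5','6','7','8','9'].flatMap
        (fun d => List.replicate (min (X.toList.count d) (Y.toList.count d)) d)).reverse =
      ['9','8','7','6','5','4','3','2','1','0'].flatMap
        (fun d => List.replicate (min (X.toList.count d) (Y.toList.count d)) d) := by
    simp [List.flatMap_cons, List.reverse_append, List.append_assoc]
  show (if pvMerge (PySem.List.sorted (X.toList.filter pvIsDig) (fun c => c) false)
      (PySem.List.sorted (Y.toList.filter pvIsDig) (fun c => c) false) [] = [] then "-1"
    else if (pvMerge (PySem.List.sorted (X.toList.filter pvIsDig) (fun c => c) false)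
      (PySem.List.sorted (Y.toList.filter pvIsDig) (fun c => c) false) []).reverse.headD ' ' = '0'
    then "0"
    else String.ofList (pvMerge (PySem.List.sorted (X.toList.filter pvIsDig) (fun c => c) false)
      (PySem.List.sorted (Y.toList.filter pvIsDig) (fun c => c) false) []).reverse) = _
  rw [hasc, hrev]
  by_cases hn : ['0','1','2','3','4','5','6','7','8','9'].flatMap
        (fun d => List.replicate (min (X.toList.count d) (Y.toList.count d)) d) = []
  · rw [if_pos hn, if_pos (by rw [← hrev, hn]; rfl)]
  · have hd : ¬ ['9','8','7','6','5','4','3','2','1','0'].flatMap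
        (fun d => List.replicate (min (X.toList.count d) (Y.toList.count d)) d) = [] :=
      fun h => hn (by rwa [← hrev, List.reverse_eq_nil_iff] at h)
    rw [if_neg hn, if_neg hd]

-- the two normal forms agree: split off the '0' block and resolve the special cases
lemma core_eq (m0 : Nat) (l : List Char) (hl : ∀ c ∈ l, c ≠ '0') :
    (if l = [] then (if m0 = 0 then "-1" else "0") else String.ofList (l ++ List.replicate m0 '0'))
    = (if l ++ List.replicate m0 '0' = [] then "-1"
       else if (l ++ List.replicate m0 '0').headD ' ' = '0' then "0"
       else String.ofList (l ++ List.replicate m0 '0')) := by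
  by_cases h : l = []
  · subst h
    cases m0 with
    | zero => simp
    | succ m => simp [List.replicate_succ]
  · have hh : l.headD ' ' ≠ '0' := fun h0 => hl _ (headD_mem l h ' ') h0
    have hs : l ++ List.replicate m0 '0' ≠ [] := by simp [h]
    rw [if_neg h, if_neg hs, headD_append _ _ h, if_neg hh]

-- ===== VERDICT (by name: the statement is the Claim_ definition above) =====
theorem solution_spec : Claim_equal_solution := by
  unfold Claim_equal_solution
  intro X Y _
  unfold Spec_solution
  rw [solution_core, alt_core]
  rw [show (['9','8','7','6','5','4','3','2','1','0'] : List Char)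
      = ['9','8','7','6','5','4','3','2','1'] ++ ['0'] from rfl, List.flatMap_append]
  simp only [List.flatMap_cons, List.flatMap_nil, List.append_nil]
  rw [core_eq]
  intro c hc
  simp only [List.mem_append, List.mem_replicate] at hc
  rcases hc with ⟨-, rfl⟩ | ⟨-, rfl⟩ | ⟨-, rfl⟩ | ⟨-, rfl⟩ | ⟨-, rfl⟩ | ⟨-, rfl⟩ | ⟨-, rfl⟩ | ⟨-, rfl⟩ | ⟨-, rfl⟩ <;> decide
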